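-- pv_equiv track=rewrite | github.com/Pmobilee/Recall-Rogue | scripts/content-pipeline/vocab/clean-distractors.py | _ends_with_trailing_fragment
-- ===== SOURCE A (Python) =====
-- _TRAILING_FRAGMENTS = [
--     "Such-and-such an",
--     "although an",
--     "during a",
--     "gives a",
--     "As in",
--     "being",
--     "an ",
--     "a ",
-- ]
--
-- def _ends_with_trailing_fragment(s: str) -> str | None:
--     """Return the matched trailing fragment if s ends with a dangling clause fragment.
--
--     Requires the fragment to be preceded by whitespace, punctuation, or start-of-
--     string to avoid false positives (e.g. 'via' ending in 'a').
--     Returns the matched fragment string, or None if no match.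
--     """
--     stripped = s.rstrip()
--     for frag in _TRAILING_FRAGMENTS:
--         frag_s = frag.rstrip()
--         if not stripped.endswith(frag_s):
--             continue
--         pos = len(stripped) - len(frag_s)
--         if pos == 0:
--             return frag
--         before = stripped[pos - 1]
--         if before in (" ", ",", ";", "-", "."):
--             return frag
--     return None
-- ===== SOURCE B (Python) =====
-- _FRAG_MAP = {
--     "Such-and-such an": "Such-and-such an",
--     "although an": "although an",
--     "during a": "during a",
--     "gives a": "gives a",
--     "As in": "As in",
--     "being": "being",
--     "an": "an ",
--     "a": "a ",
-- }
-- _MAX_FRAG_LEN = 16  # len("Such-and-such an")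
-- _BOUNDARY = " ,;-."
--
--
-- def _ends_with_trailing_fragment(s: str) -> str | None:
--     # Scan boundary positions in the last _MAX_FRAG_LEN characters and look the
--     # suffix up in a hash map, instead of testing every fragment with endswith.
--     t = s.rstrip()
--     n = len(t)
--     for i in range(max(0, n - _MAX_FRAG_LEN), n):
--         if (i == 0 or t[i - 1] in _BOUNDARY) and t[i:] in _FRAG_MAP:
--             return _FRAG_MAP[t[i:]]
--     return None
-- ===== Notes on version B (the rewrite author's own statement) =====
-- stated objective: alternative
-- what changed: A tests each of the 8 fragments with endswith plus a boundary check; B instead scans the boundary positions within the last 16 characters of the stripped string once and looks the suffix up in a precomputed hash map from stripped fragment to original fragment.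
import Mathlib
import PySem

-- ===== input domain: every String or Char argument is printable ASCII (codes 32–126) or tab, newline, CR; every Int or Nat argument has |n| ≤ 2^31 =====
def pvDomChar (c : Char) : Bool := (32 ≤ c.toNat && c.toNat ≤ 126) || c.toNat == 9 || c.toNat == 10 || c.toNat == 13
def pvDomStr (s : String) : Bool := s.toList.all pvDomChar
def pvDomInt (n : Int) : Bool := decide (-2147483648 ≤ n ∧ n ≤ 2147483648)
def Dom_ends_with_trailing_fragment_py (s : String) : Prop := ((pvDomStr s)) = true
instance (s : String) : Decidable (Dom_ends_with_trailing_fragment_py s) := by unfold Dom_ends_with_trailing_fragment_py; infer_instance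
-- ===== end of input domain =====

-- B replaces A's fragment-by-fragment endswith scan by a single scan of the boundary
-- positions in the last 16 characters with a hash-map suffix lookup (objective: alternative).

-- ===== PORT A =====
def pvTrailingFragments : List String :=
  ["Such-and-such an", "although an", "during a", "gives a", "As in", "being", "an ", "a "]

-- Python: `before in (" ", ",", ";", "-", ".")` — `before` is the one-character string
-- stripped[pos-1], so the tuple membership is exactly a comparison of that character.
def pvBoundaryA : List Char := [' ', ',', ';', '-', '.']

def pvFragLoopA (stripped : String) : List String → Option String
  | [] => none
  | frag :: rest =>
    let frag_s := PySem.Str.rstrip frag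
    if PySem.Str.endswith stripped frag_s then
      let pos : Int := PySem.Str.len stripped - PySem.Str.len frag_s
      if pos = 0 then some frag
      else
        match PySem.Str.pyGet? stripped (pos - 1) with
        | some before => if before ∈ pvBoundaryA then some frag else pvFragLoopA stripped rest
        | none => pvFragLoopA stripped rest   -- unreachable: 1 ≤ pos < len stripped
    else pvFragLoopA stripped rest

def ends_with_trailing_fragment_py (s : String) : Option String :=
  pvFragLoopA (PySem.Str.rstrip s) pvTrailingFragments

-- ===== PORT B =====
def pvFragMapB : PySem.Dict String String :=
  PySem.Dict.ofList
    [("Such-and-such an", "Such-and-such an"), ("although an", "although an"),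
     ("during a", "during a"), ("gives a", "gives a"), ("As in", "As in"),
     ("being", "being"), ("an", "an "), ("a", "a ")]

def pvMaxFragLen : Int := 16

-- Python: `t[i-1] in _BOUNDARY` with _BOUNDARY a tuple of one-character strings.
def pvBoundaryB : List Char := [' ', ',', ';', '-', '.']

def ends_with_trailing_fragment_py_alt (s : String) : Option String :=
  let t := PySem.Str.rstrip s
  let n := PySem.Str.len t
  -- `for i in range(...): if cond: return ...` ported as findSome? over the range;
  -- `suf in map and return map[suf]` is exactly Dict.get?.
  (PySem.List.pyRange (max 0 (n - pvMaxFragLen)) n 1).findSome? (fun i =>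
    if (i == 0) || (match PySem.Str.pyGet? t (i - 1) with
                    | some c => c ∈ pvBoundaryB
                    | none => false) then
      PySem.Dict.get? pvFragMapB (PySem.Str.slice t (some i) none)
    else none)

-- ===== PRECONDITION & SPEC =====
def Spec_ends_with_trailing_fragment_py (s : String) (out : Option String) : Prop := out = ends_with_trailing_fragment_py_alt s
instance (s : String) (out : Option String) : Decidable (Spec_ends_with_trailing_fragment_py s out) := by unfold Spec_ends_with_trailing_fragment_py; infer_instance

-- ===== CLAIM (what is proved, stated in full; the proofs are below) =====
def Claim_equal_ends_with_trailing_fragment_py : Prop := ∀ (s : String), Dom_ends_with_trailing_fragment_py s → Spec_ends_with_trailing_fragment_py s (ends_with_trailing_fragment_py s)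

-- ===== LEMMAS AND PROOFS =====

-- The body of B's per-index function, named for the proofs.
def pvG (t : String) (i : Int) : Option String :=
  if (i == 0) || (match PySem.Str.pyGet? t (i - 1) with
                  | some c => c ∈ pvBoundaryB
                  | none => false) then
    PySem.Dict.get? pvFragMapB (PySem.Str.slice t (some i) none)
  else none

-- B's range scan, restated as a countdown over suffix lengths L = M, M-1, …, 1.
def pvScan (t : String) (n : Int) : Nat → Option String
  | 0 => none
  | (L + 1) => if ((L : Int) + 1) ≤ n then
                 (pvG t (n - ((L : Int) + 1))).or (pvScan t n L)
               else pvScan t n L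

lemma pvScan_eq (t : String) (n : Int) (hn : 0 ≤ n) :
    ∀ (M : Nat), (PySem.List.pyRange (max 0 (n - (M : Int))) n 1).findSome? (pvG t) = pvScan t n M := by
  intro M; induction M with
  | zero =>
      simp only [Nat.cast_zero, sub_zero, pvScan]
      rw [max_eq_right hn, PySem.List.pyRange_one_eq_nil le_rfl]
      simp
  | succ L ih =>
      by_cases h : ((L : Int) + 1) ≤ n
      · rw [show max 0 (n - ((L + 1 : Nat) : Int)) = n - ((L : Int) + 1) by push_cast; omega,
            PySem.List.pyRange_one_cons (by omega), List.findSome?_cons]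
        rw [show n - ((L : Int) + 1) + 1 = n - (L : Int) by ring]
        rw [show PySem.List.pyRange (n - (L : Int)) n 1
              = PySem.List.pyRange (max 0 (n - (L : Int))) n 1 by rw [max_eq_right (by omega)]]
        rw [ih]
        simp only [pvScan, if_pos h]
        cases pvG t (n - ((L : Int) + 1)) <;> simp [Option.or]
      · rw [show max 0 (n - ((L + 1 : Nat) : Int)) = 0 by push_cast; omega]
        rw [show max 0 (n - (L : Int)) = 0 by omega] at ih
        simp only [pvScan, if_neg h]
        exact ih

lemma pvAlt_eq (s : String) :
    ends_with_trailing_fragment_py_alt s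
      = pvScan (PySem.Str.rstrip s) (PySem.Str.len (PySem.Str.rstrip s)) 16 := by
  rw [← pvScan_eq (PySem.Str.rstrip s) _ (by rw [PySem.Str.len_eq]; positivity) 16]
  rfl

-- get? on the literal fragment map, as a chain of propositional ifs.
lemma pvGet_fragMap (x : String) :
    PySem.Dict.get? pvFragMapB x =
      if x = "Such-and-such an" then some "Such-and-such an"
      else if x = "although an" then some "although an"
      else if x = "during a" then some "during a"
      else if x = "gives a" then some "gives a"
      else if x = "As in" then some "As in"
      else if x = "being" then some "being"
      else if x = "an" then some "an "
      else if x = "a" then some "a "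
      else none := by
  have h : pvFragMapB = PySem.Dict.mk
    [("Such-and-such an", "Such-and-such an"), ("although an", "although an"),
     ("during a", "during a"), ("gives a", "gives a"), ("As in", "As in"),
     ("being", "being"), ("an", "an "), ("a", "a ")] := by decide
  rw [h]
  simp only [PySem.Dict.get?_mk_cons, beq_iff_eq]
  simp [PySem.Dict.get?, eq_comm]

lemma pvEndswith_iff (t k : String) : PySem.Str.endswith t k = true ↔ k.toList <:+ t.toList := by
  rw [PySem.Str.endswith_eq]
  simp [PySem.Chars.endswith, List.isSuffixOf_iff_suffix]

lemma pvSliceToList (t : String) (i : Int) (h : 0 ≤ i) :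
    (PySem.Str.slice t (some i) none).toList = t.toList.drop i.toNat := by
  rw [PySem.Str.toList_slice]
  exact PySem.List.slice_from _ h

-- A level of pvScan whose suffix length matches no fragment is a no-op.
lemma pvScan_noop (t : String) (L : Nat)
    (hlen : ∀ x : String, x.toList.length = L + 1 → PySem.Dict.get? pvFragMapB x = none) :
    pvScan t ((t.toList.length : Int)) (L + 1) = pvScan t ((t.toList.length : Int)) L := by
  simp only [pvScan]
  by_cases h : ((L : Int) + 1) ≤ ((t.toList.length : Int))
  · rw [if_pos h]
    have hg : pvG t (((t.toList.length : Int)) - ((L : Int) + 1)) = none := by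
      unfold pvG
      rw [hlen (PySem.Str.slice t (some (((t.toList.length : Int)) - ((L : Int) + 1))) none)
            (by rw [pvSliceToList _ _ (by omega), List.length_drop]; omega)]
      simp
    rw [hg, Option.none_or]
  · rw [if_neg h]

-- A level of pvScan whose suffix length is the length of exactly one fragment key
-- equals the corresponding step of A's loop.
lemma pvScan_key (t frag k : String) (rest : List String) (L : Nat)
    (hkL : k.toList.length = L + 1)
    (hfrag : PySem.Str.rstrip frag = k)
    (hget : ∀ x : String, x.toList.length = L + 1 →
        PySem.Dict.get? pvFragMapB x = if x = k then some frag else none)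
    (hrest : pvScan t ((t.toList.length : Int)) L = pvFragLoopA t rest) :
    pvScan t ((t.toList.length : Int)) (L + 1) = pvFragLoopA t (frag :: rest) := by
  have hlenk : PySem.Str.len k = ((L : Int) + 1) := by
    rw [PySem.Str.len_eq, hkL]; push_cast; ring
  simp only [pvScan, pvFragLoopA, hfrag, hlenk, PySem.Str.len_eq]
  by_cases h : ((L : Int) + 1) ≤ ((t.toList.length : Int))
  · rw [if_pos h]
    by_cases hsuf : k.toList <:+ t.toList
    · have hend : PySem.Str.endswith t k = true := (pvEndswith_iff t k).mpr hsuf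
      have hdrop : t.toList.drop ((((t.toList.length : Int)) - ((L : Int) + 1)).toNat) = k.toList := by
        rw [List.suffix_iff_eq_drop] at hsuf
        rw [show ((((t.toList.length : Int)) - ((L : Int) + 1)).toNat) = t.toList.length - k.toList.length by omega]
        exact hsuf.symm
      have hslice : PySem.Str.slice t (some (((t.toList.length : Int)) - ((L : Int) + 1))) none = k := by
        apply String.toList_inj.mp
        rw [pvSliceToList _ _ (by omega)]
        exact hdrop
      have hgetk := hget k hkL
      by_cases h0 : (((t.toList.length : Int)) - ((L : Int) + 1)) = 0
      · simp_all [pvG]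
      · rw [show pvBoundaryA = pvBoundaryB from rfl]
        cases hpg : PySem.Str.pyGet? t ((((t.toList.length : Int)) - ((L : Int) + 1)) - 1) with
        | none => simp_all [pvG]
        | some c =>
          by_cases hc : c ∈ pvBoundaryB
          · simp_all [pvG]
          · simp_all [pvG]
    · have hend : PySem.Str.endswith t k = false := by
        cases hE : PySem.Str.endswith t k
        · rfl
        · exact absurd ((pvEndswith_iff t k).mp hE) hsuf
      have hne : PySem.Str.slice t (some (((t.toList.length : Int)) - ((L : Int) + 1))) none ≠ k := by
        intro he
        apply hsuf
        rw [List.suffix_iff_eq_drop,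
            show t.toList.length - k.toList.length = ((((t.toList.length : Int)) - ((L : Int) + 1)).toNat) by omega]
        rw [← pvSliceToList _ _ (by omega), he]
      have hg : pvG t (((t.toList.length : Int)) - ((L : Int) + 1)) = none := by
        unfold pvG
        rw [hget _ (by rw [pvSliceToList _ _ (by omega), List.length_drop]; omega), if_neg hne]
        simp
      simp_all
  · rw [if_neg h]
    have hend : PySem.Str.endswith t k = false := by
      cases hE : PySem.Str.endswith t k
      · rfl
      · have := ((pvEndswith_iff t k).mp hE).length_le
        omega
    simp_all

-- A level of pvScan whose suffix length is the length of exactly two fragment keys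
-- equals the two corresponding steps of A's loop.
lemma pvScan_key2 (t frag1 k1 frag2 k2 : String) (rest : List String) (L : Nat)
    (hk1L : k1.toList.length = L + 1) (hk2L : k2.toList.length = L + 1)
    (hne12 : k2 ≠ k1)
    (hfrag1 : PySem.Str.rstrip frag1 = k1) (hfrag2 : PySem.Str.rstrip frag2 = k2)
    (hget : ∀ x : String, x.toList.length = L + 1 →
        PySem.Dict.get? pvFragMapB x =
          if x = k1 then some frag1 else if x = k2 then some frag2 else none)
    (hrest : pvScan t ((t.toList.length : Int)) L = pvFragLoopA t rest) :
    pvScan t ((t.toList.length : Int)) (L + 1) = pvFragLoopA t (frag1 :: frag2 :: rest) := by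
  have hlenk1 : PySem.Str.len k1 = ((L : Int) + 1) := by
    rw [PySem.Str.len_eq, hk1L]; push_cast; ring
  have hlenk2 : PySem.Str.len k2 = ((L : Int) + 1) := by
    rw [PySem.Str.len_eq, hk2L]; push_cast; ring
  simp only [pvScan, pvFragLoopA, hfrag1, hfrag2, hlenk1, hlenk2, PySem.Str.len_eq]
  by_cases h : ((L : Int) + 1) ≤ ((t.toList.length : Int))
  · rw [if_pos h]
    by_cases hsuf1 : k1.toList <:+ t.toList
    · have hend1 : PySem.Str.endswith t k1 = true := (pvEndswith_iff t k1).mpr hsuf1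
      have hdrop : t.toList.drop ((((t.toList.length : Int)) - ((L : Int) + 1)).toNat) = k1.toList := by
        rw [List.suffix_iff_eq_drop] at hsuf1
        rw [show ((((t.toList.length : Int)) - ((L : Int) + 1)).toNat) = t.toList.length - k1.toList.length by omega]
        exact hsuf1.symm
      have hslice : PySem.Str.slice t (some (((t.toList.length : Int)) - ((L : Int) + 1))) none = k1 := by
        apply String.toList_inj.mp
        rw [pvSliceToList _ _ (by omega)]
        exact hdrop
      have hgetk := hget k1 hk1L
      clear hget
      by_cases h0 : (((t.toList.length : Int)) - ((L : Int) + 1)) = 0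
      · simp_all [pvG]
      · rw [show pvBoundaryA = pvBoundaryB from rfl]
        cases hpg : PySem.Str.pyGet? t ((((t.toList.length : Int)) - ((L : Int) + 1)) - 1) with
        | none => simp_all [pvG]
        | some c =>
          by_cases hc : c ∈ pvBoundaryB
          · simp_all [pvG]
          · simp_all [pvG]
    · have hend1 : PySem.Str.endswith t k1 = false := by
        cases hE : PySem.Str.endswith t k1
        · rfl
        · exact absurd ((pvEndswith_iff t k1).mp hE) hsuf1
      by_cases hsuf2 : k2.toList <:+ t.toList
      · have hend2 : PySem.Str.endswith t k2 = true := (pvEndswith_iff t k2).mpr hsuf2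
        have hdrop : t.toList.drop ((((t.toList.length : Int)) - ((L : Int) + 1)).toNat) = k2.toList := by
          rw [List.suffix_iff_eq_drop] at hsuf2
          rw [show ((((t.toList.length : Int)) - ((L : Int) + 1)).toNat) = t.toList.length - k2.toList.length by omega]
          exact hsuf2.symm
        have hslice : PySem.Str.slice t (some (((t.toList.length : Int)) - ((L : Int) + 1))) none = k2 := by
          apply String.toList_inj.mp
          rw [pvSliceToList _ _ (by omega)]
          exact hdrop
        have hgetk : PySem.Dict.get? pvFragMapB k2 = some frag2 := by
          rw [hget k2 hk2L, if_neg hne12, if_pos rfl]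
        clear hget
        by_cases h0 : (((t.toList.length : Int)) - ((L : Int) + 1)) = 0
        · simp_all [pvG]
        · rw [show pvBoundaryA = pvBoundaryB from rfl]
          cases hpg : PySem.Str.pyGet? t ((((t.toList.length : Int)) - ((L : Int) + 1)) - 1) with
          | none => simp_all [pvG]
          | some c =>
            by_cases hc : c ∈ pvBoundaryB
            · simp_all [pvG]
            · simp_all [pvG]
      · have hend2 : PySem.Str.endswith t k2 = false := by
          cases hE : PySem.Str.endswith t k2
          · rfl
          · exact absurd ((pvEndswith_iff t k2).mp hE) hsuf2
        have hne1 : PySem.Str.slice t (some (((t.toList.length : Int)) - ((L : Int) + 1))) none ≠ k1 := by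
          intro he
          apply hsuf1
          rw [List.suffix_iff_eq_drop,
              show t.toList.length - k1.toList.length = ((((t.toList.length : Int)) - ((L : Int) + 1)).toNat) by omega]
          rw [← pvSliceToList _ _ (by omega), he]
        have hne2 : PySem.Str.slice t (some (((t.toList.length : Int)) - ((L : Int) + 1))) none ≠ k2 := by
          intro he
          apply hsuf2
          rw [List.suffix_iff_eq_drop,
              show t.toList.length - k2.toList.length = ((((t.toList.length : Int)) - ((L : Int) + 1)).toNat) by omega]
          rw [← pvSliceToList _ _ (by omega), he]
        have hg : pvG t (((t.toList.length : Int)) - ((L : Int) + 1)) = none := by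
          unfold pvG
          rw [hget _ (by rw [pvSliceToList _ _ (by omega), List.length_drop]; omega),
              if_neg hne1, if_neg hne2]
          simp
        clear hget
        simp_all
  · rw [if_neg h]
    have hend1 : PySem.Str.endswith t k1 = false := by
      cases hE : PySem.Str.endswith t k1
      · rfl
      · have := ((pvEndswith_iff t k1).mp hE).length_le
        omega
    have hend2 : PySem.Str.endswith t k2 = false := by
      cases hE : PySem.Str.endswith t k2
      · rfl
      · have := ((pvEndswith_iff t k2).mp hE).length_le
        omega
    simp_all

-- ===== VERDICT (by name: the statement is the Claim_ definition above) =====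
theorem ends_with_trailing_fragment_py_spec : Claim_equal_ends_with_trailing_fragment_py := by
  intro s _
  unfold Spec_ends_with_trailing_fragment_py
  rw [pvAlt_eq, PySem.Str.len_eq]
  show pvFragLoopA (PySem.Str.rstrip s) pvTrailingFragments = _
  set t := PySem.Str.rstrip s with ht
  symm
  have ne : ∀ (M : Nat) (x : String), x.toList.length = M → ∀ (u : String), u.toList.length ≠ M → x ≠ u :=
    fun M x hx u hu he => hu (he ▸ hx)
  have h0 : pvScan t ((t.toList.length : Int)) 0 = pvFragLoopA t [] := rfl
  have h1 : pvScan t ((t.toList.length : Int)) 1 = pvFragLoopA t ["a "] :=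
    pvScan_key t "a " "a" [] 0 (by decide) (by decide)
      (fun x hx => by
        rw [pvGet_fragMap, if_neg (ne _ x hx "Such-and-such an" (by decide)),
            if_neg (ne _ x hx "although an" (by decide)),
            if_neg (ne _ x hx "during a" (by decide)),
            if_neg (ne _ x hx "gives a" (by decide)),
            if_neg (ne _ x hx "As in" (by decide)),
            if_neg (ne _ x hx "being" (by decide)),
            if_neg (ne _ x hx "an" (by decide))])
      h0
  have h2 : pvScan t ((t.toList.length : Int)) 2 = pvFragLoopA t ["an ", "a "] :=
    pvScan_key t "an " "an" ["a "] 1 (by decide) (by decide)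
      (fun x hx => by
        rw [pvGet_fragMap, if_neg (ne _ x hx "Such-and-such an" (by decide)),
            if_neg (ne _ x hx "although an" (by decide)),
            if_neg (ne _ x hx "during a" (by decide)),
            if_neg (ne _ x hx "gives a" (by decide)),
            if_neg (ne _ x hx "As in" (by decide)),
            if_neg (ne _ x hx "being" (by decide)),
            if_neg (ne _ x hx "a" (by decide))])
      h1
  have hn3 : pvScan t ((t.toList.length : Int)) 3 = pvScan t ((t.toList.length : Int)) 2 :=
    pvScan_noop t 2 (fun x hx => by
      rw [pvGet_fragMap, if_neg (ne _ x hx "Such-and-such an" (by decide)),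
            if_neg (ne _ x hx "although an" (by decide)),
            if_neg (ne _ x hx "during a" (by decide)),
            if_neg (ne _ x hx "gives a" (by decide)),
            if_neg (ne _ x hx "As in" (by decide)),
            if_neg (ne _ x hx "being" (by decide)),
            if_neg (ne _ x hx "an" (by decide)),
            if_neg (ne _ x hx "a" (by decide))])
  have hn4 : pvScan t ((t.toList.length : Int)) 4 = pvScan t ((t.toList.length : Int)) 3 :=
    pvScan_noop t 3 (fun x hx => by
      rw [pvGet_fragMap, if_neg (ne _ x hx "Such-and-such an" (by decide)),
            if_neg (ne _ x hx "although an" (by decide)),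
            if_neg (ne _ x hx "during a" (by decide)),
            if_neg (ne _ x hx "gives a" (by decide)),
            if_neg (ne _ x hx "As in" (by decide)),
            if_neg (ne _ x hx "being" (by decide)),
            if_neg (ne _ x hx "an" (by decide)),
            if_neg (ne _ x hx "a" (by decide))])
  have h5 : pvScan t ((t.toList.length : Int)) 5 = pvFragLoopA t ["As in", "being", "an ", "a "] :=
    pvScan_key2 t "As in" "As in" "being" "being" ["an ", "a "] 4 (by decide) (by decide) (by decide)
      (by decide) (by decide)
      (fun x hx => by
        rw [pvGet_fragMap, if_neg (ne _ x hx "Such-and-such an" (by decide)),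
            if_neg (ne _ x hx "although an" (by decide)), if_neg (ne _ x hx "during a" (by decide)),
            if_neg (ne _ x hx "gives a" (by decide)), if_neg (ne _ x hx "an" (by decide)),
            if_neg (ne _ x hx "a" (by decide))])
      (hn4.trans (hn3.trans h2))
  have hn6 : pvScan t ((t.toList.length : Int)) 6 = pvScan t ((t.toList.length : Int)) 5 :=
    pvScan_noop t 5 (fun x hx => by
      rw [pvGet_fragMap, if_neg (ne _ x hx "Such-and-such an" (by decide)),
            if_neg (ne _ x hx "although an" (by decide)),
            if_neg (ne _ x hx "during a" (by decide)),
            if_neg (ne _ x hx "gives a" (by decide)),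
            if_neg (ne _ x hx "As in" (by decide)),
            if_neg (ne _ x hx "being" (by decide)),
            if_neg (ne _ x hx "an" (by decide)),
            if_neg (ne _ x hx "a" (by decide))])
  have h7 : pvScan t ((t.toList.length : Int)) 7 = pvFragLoopA t ["gives a", "As in", "being", "an ", "a "] :=
    pvScan_key t "gives a" "gives a" ["As in", "being", "an ", "a "] 6 (by decide) (by decide)
      (fun x hx => by
        rw [pvGet_fragMap, if_neg (ne _ x hx "Such-and-such an" (by decide)),
            if_neg (ne _ x hx "although an" (by decide)),
            if_neg (ne _ x hx "during a" (by decide)),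
            if_neg (ne _ x hx "As in" (by decide)),
            if_neg (ne _ x hx "being" (by decide)),
            if_neg (ne _ x hx "an" (by decide)),
            if_neg (ne _ x hx "a" (by decide))])
      (hn6.trans h5)
  have h8 : pvScan t ((t.toList.length : Int)) 8 = pvFragLoopA t ["during a", "gives a", "As in", "being", "an ", "a "] :=
    pvScan_key t "during a" "during a" ["gives a", "As in", "being", "an ", "a "] 7 (by decide) (by decide)
      (fun x hx => by
        rw [pvGet_fragMap, if_neg (ne _ x hx "Such-and-such an" (by decide)),
            if_neg (ne _ x hx "although an" (by decide)),
            if_neg (ne _ x hx "gives a" (by decide)),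
            if_neg (ne _ x hx "As in" (by decide)),
            if_neg (ne _ x hx "being" (by decide)),
            if_neg (ne _ x hx "an" (by decide)),
            if_neg (ne _ x hx "a" (by decide))])
      h7
  have hn9 : pvScan t ((t.toList.length : Int)) 9 = pvScan t ((t.toList.length : Int)) 8 :=
    pvScan_noop t 8 (fun x hx => by
      rw [pvGet_fragMap, if_neg (ne _ x hx "Such-and-such an" (by decide)),
            if_neg (ne _ x hx "although an" (by decide)),
            if_neg (ne _ x hx "during a" (by decide)),
            if_neg (ne _ x hx "gives a" (by decide)),
            if_neg (ne _ x hx "As in" (by decide)),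
            if_neg (ne _ x hx "being" (by decide)),
            if_neg (ne _ x hx "an" (by decide)),
            if_neg (ne _ x hx "a" (by decide))])
  have hn10 : pvScan t ((t.toList.length : Int)) 10 = pvScan t ((t.toList.length : Int)) 9 :=
    pvScan_noop t 9 (fun x hx => by
      rw [pvGet_fragMap, if_neg (ne _ x hx "Such-and-such an" (by decide)),
            if_neg (ne _ x hx "although an" (by decide)),
            if_neg (ne _ x hx "during a" (by decide)),
            if_neg (ne _ x hx "gives a" (by decide)),
            if_neg (ne _ x hx "As in" (by decide)),
            if_neg (ne _ x hx "being" (by decide)),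
            if_neg (ne _ x hx "an" (by decide)),
            if_neg (ne _ x hx "a" (by decide))])
  have h11 : pvScan t ((t.toList.length : Int)) 11 = pvFragLoopA t ["although an", "during a", "gives a", "As in", "being", "an ", "a "] :=
    pvScan_key t "although an" "although an" ["during a", "gives a", "As in", "being", "an ", "a "] 10 (by decide) (by decide)
      (fun x hx => by
        rw [pvGet_fragMap, if_neg (ne _ x hx "Such-and-such an" (by decide)),
            if_neg (ne _ x hx "during a" (by decide)),
            if_neg (ne _ x hx "gives a" (by decide)),
            if_neg (ne _ x hx "As in" (by decide)),
            if_neg (ne _ x hx "being" (by decide)),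
            if_neg (ne _ x hx "an" (by decide)),
            if_neg (ne _ x hx "a" (by decide))])
      (hn10.trans (hn9.trans h8))
  have hn12 : pvScan t ((t.toList.length : Int)) 12 = pvScan t ((t.toList.length : Int)) 11 :=
    pvScan_noop t 11 (fun x hx => by
      rw [pvGet_fragMap, if_neg (ne _ x hx "Such-and-such an" (by decide)),
            if_neg (ne _ x hx "although an" (by decide)),
            if_neg (ne _ x hx "during a" (by decide)),
            if_neg (ne _ x hx "gives a" (by decide)),
            if_neg (ne _ x hx "As in" (by decide)),
            if_neg (ne _ x hx "being" (by decide)),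
            if_neg (ne _ x hx "an" (by decide)),
            if_neg (ne _ x hx "a" (by decide))])
  have hn13 : pvScan t ((t.toList.length : Int)) 13 = pvScan t ((t.toList.length : Int)) 12 :=
    pvScan_noop t 12 (fun x hx => by
      rw [pvGet_fragMap, if_neg (ne _ x hx "Such-and-such an" (by decide)),
            if_neg (ne _ x hx "although an" (by decide)),
            if_neg (ne _ x hx "during a" (by decide)),
            if_neg (ne _ x hx "gives a" (by decide)),
            if_neg (ne _ x hx "As in" (by decide)),
            if_neg (ne _ x hx "being" (by decide)),
            if_neg (ne _ x hx "an" (by decide)),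
            if_neg (ne _ x hx "a" (by decide))])
  have hn14 : pvScan t ((t.toList.length : Int)) 14 = pvScan t ((t.toList.length : Int)) 13 :=
    pvScan_noop t 13 (fun x hx => by
      rw [pvGet_fragMap, if_neg (ne _ x hx "Such-and-such an" (by decide)),
            if_neg (ne _ x hx "although an" (by decide)),
            if_neg (ne _ x hx "during a" (by decide)),
            if_neg (ne _ x hx "gives a" (by decide)),
            if_neg (ne _ x hx "As in" (by decide)),
            if_neg (ne _ x hx "being" (by decide)),
            if_neg (ne _ x hx "an" (by decide)),
            if_neg (ne _ x hx "a" (by decide))])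
  have hn15 : pvScan t ((t.toList.length : Int)) 15 = pvScan t ((t.toList.length : Int)) 14 :=
    pvScan_noop t 14 (fun x hx => by
      rw [pvGet_fragMap, if_neg (ne _ x hx "Such-and-such an" (by decide)),
            if_neg (ne _ x hx "although an" (by decide)),
            if_neg (ne _ x hx "during a" (by decide)),
            if_neg (ne _ x hx "gives a" (by decide)),
            if_neg (ne _ x hx "As in" (by decide)),
            if_neg (ne _ x hx "being" (by decide)),
            if_neg (ne _ x hx "an" (by decide)),
            if_neg (ne _ x hx "a" (by decide))])
  have h16 : pvScan t ((t.toList.length : Int)) 16 = pvFragLoopA t pvTrailingFragments :=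
    pvScan_key t "Such-and-such an" "Such-and-such an"
      ["although an", "during a", "gives a", "As in", "being", "an ", "a "] 15 (by decide) (by decide)
      (fun x hx => by
        rw [pvGet_fragMap, if_neg (ne _ x hx "although an" (by decide)),
            if_neg (ne _ x hx "during a" (by decide)),
            if_neg (ne _ x hx "gives a" (by decide)),
            if_neg (ne _ x hx "As in" (by decide)),
            if_neg (ne _ x hx "being" (by decide)),
            if_neg (ne _ x hx "an" (by decide)),
            if_neg (ne _ x hx "a" (by decide))])
      (hn15.trans (hn14.trans (hn13.trans (hn12.trans h11))))
  exact h16
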